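-- pv_equiv track=rewrite | github.com/Loe2b/Blokus | Blocus_local.py | calcul_resutat
-- ===== SOURCE A (Python) =====
-- piece=[
--       [[1]],
--       [[1],[1]],
--       [[1],[1],[1]],
--       [[1,0],[1,1]],
--       [[1],[1],[1],[1]],
--       [[0,1],[0,1],[1,1]],
--       [[1,0],[1,1],[1,0]],
--       [[1,1],[1,1]],
--       [[1,1,0],[0,1,1]],
--       [[1],[1],[1],[1],[1]],
--       [[0,1],[0,1],[0,1],[1,1]],
--       [[0,1],[0,1],[1,1],[1,0]],
--       [[0,1],[1,1],[1,1]],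
--       [[1,1],[0,1],[1,1]],
--       [[1,0],[1,1],[1,0],[1,0]],
--       [[0,1,0],[0,1,0],[1,1,1]],
--       [[1,0,0],[1,0,0],[1,1,1]],
--       [[1,1,0],[0,1,1],[0,0,1]],
--       [[1,0,0],[1,1,1],[0,0,1]],
--       [[1,0,0],[1,1,1],[0,1,0]],
--       [[0,1,0],[1,1,1],[0,1,0]]
--       ]
--
-- def calcul_resutat(pieces):
--     """Calcul le résultat si il reste des pieces"""
--     points = 0
--     for i in pieces:
--         P = piece[i]
--         for ligne in P:
--             for colonne in ligne:
--                 points -= colonne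
--     return points
-- ===== SOURCE B (Python) =====
-- # Cell count of each of the 21 pieces, by index (1 monomino, 1 domino, ... five-cell pieces).
-- COUNTS = [1, 2, 3, 3, 4, 4, 4, 4, 4, 5, 5, 5, 5, 5, 5, 5, 5, 5, 5, 5, 5]
--
-- def calcul_resutat(pieces):
--     """Calcul le résultat si il reste des pieces"""
--     if not pieces:
--         return 0
--     return -COUNTS[pieces[0]] + calcul_resutat(pieces[1:])
-- ===== Notes on version B (the rewrite author's own statement) =====
-- stated objective: simpler
-- what changed: Replaced the triple nested per-cell loop over the board table by a literal per-piece cell-count table and a head recursion that sums negated lookups.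
import Mathlib
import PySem

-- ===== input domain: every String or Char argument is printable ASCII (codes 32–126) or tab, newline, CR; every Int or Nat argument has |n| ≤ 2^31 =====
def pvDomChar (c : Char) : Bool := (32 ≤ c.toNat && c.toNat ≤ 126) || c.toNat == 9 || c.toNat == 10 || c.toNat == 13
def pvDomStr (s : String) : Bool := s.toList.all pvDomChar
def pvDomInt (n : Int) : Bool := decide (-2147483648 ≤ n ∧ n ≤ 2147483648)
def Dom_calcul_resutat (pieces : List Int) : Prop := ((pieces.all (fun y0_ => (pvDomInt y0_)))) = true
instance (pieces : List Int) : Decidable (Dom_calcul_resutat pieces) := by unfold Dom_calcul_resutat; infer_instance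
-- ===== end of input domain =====

-- ===== PORT A =====
-- B is simpler: a literal per-piece cell-count table and a head recursion replace A's triple nested loop.
-- Pre_ excludes out-of-range piece indices, on which Python A raises IndexError.

-- the module-level `piece` table (list of boards, each a list of rows of 0/1 cells)
def pieceTbl : List (List (List Int)) :=
  [ [[1]],
    [[1],[1]],
    [[1],[1],[1]],
    [[1,0],[1,1]],
    [[1],[1],[1],[1]],
    [[0,1],[0,1],[1,1]],
    [[1,0],[1,1],[1,0]],
    [[1,1],[1,1]],
    [[1,1,0],[0,1,1]],
    [[1],[1],[1],[1],[1]],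
    [[0,1],[0,1],[0,1],[1,1]],
    [[0,1],[0,1],[1,1],[1,0]],
    [[0,1],[1,1],[1,1]],
    [[1,1],[0,1],[1,1]],
    [[1,0],[1,1],[1,0],[1,0]],
    [[0,1,0],[0,1,0],[1,1,1]],
    [[1,0,0],[1,0,0],[1,1,1]],
    [[1,1,0],[0,1,1],[0,0,1]],
    [[1,0,0],[1,1,1],[0,0,1]],
    [[1,0,0],[1,1,1],[0,1,0]],
    [[0,1,0],[1,1,1],[0,1,0]] ]

-- literal port of A's triple loop; piece[i] raises IndexError outside Pre_ (getD [] is never hit inside Pre_)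
def calcul_resutat (pieces : List Int) : Int :=
  pieces.foldl (fun points i =>
    let P := (PySem.List.pyGet? pieceTbl i).getD []
    P.foldl (fun pts ligne => ligne.foldl (fun p colonne => p - colonne) pts) points) 0

-- ===== PORT B =====
-- COUNTS = [1, 2, 3, 3, 4, 4, 4, 4, 4, 5, 5, 5, 5, 5, 5, 5, 5, 5, 5, 5, 5]
def countsTbl : List Int := [1, 2, 3, 3, 4, 4, 4, 4, 4, 5, 5, 5, 5, 5, 5, 5, 5, 5, 5, 5, 5]

-- if not pieces: return 0; else -COUNTS[pieces[0]] + calcul_resutat(pieces[1:])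
def calcul_resutat_alt : List Int → Int
  | [] => 0
  | i :: rest => -((PySem.List.pyGet? countsTbl i).getD 0) + calcul_resutat_alt rest

-- ===== PRECONDITION & SPEC =====
-- Pre_ excludes exactly the indices on which Python A raises IndexError (the table has length 21;
-- Python indexing accepts -21 ≤ i < 21, negative meaning from the end).
def Pre_calcul_resutat (pieces : List Int) : Prop :=
  ∀ i ∈ pieces, -21 ≤ i ∧ i < 21
instance (pieces : List Int) : Decidable (Pre_calcul_resutat pieces) := by
  unfold Pre_calcul_resutat; infer_instance
def pvWitness_calcul_resutat : List Int := [0, 3, -1, 20]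

def Spec_calcul_resutat (pieces : List Int) (out : Int) : Prop := out = calcul_resutat_alt pieces
instance (pieces : List Int) (out : Int) : Decidable (Spec_calcul_resutat pieces out) := by unfold Spec_calcul_resutat; infer_instance

-- ===== CLAIM =====
def Claim_equal_calcul_resutat : Prop := ∀ (pieces : List Int), Dom_calcul_resutat pieces → Pre_calcul_resutat pieces → Spec_calcul_resutat pieces (calcul_resutat pieces)

-- ===== LEMMAS AND PROOFS =====

-- one step: for an in-range index, A's triple inner loop subtracts exactly B's table count
lemma step_eq (pts i : Int) (h1 : -21 ≤ i) (h2 : i < 21) :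
    ((PySem.List.pyGet? pieceTbl i).getD []).foldl
      (fun pts ligne => ligne.foldl (fun p colonne => p - colonne) pts) pts
      = pts - (PySem.List.pyGet? countsTbl i).getD 0 := by
  interval_cases i <;> simp [pieceTbl, countsTbl, PySem.List.pyGet?, PySem.List.pyIdx?] <;> ring

lemma fold_eq (pieces : List Int) (h : ∀ i ∈ pieces, -21 ≤ i ∧ i < 21) : ∀ (acc : Int),
    pieces.foldl (fun points i =>
      let P := (PySem.List.pyGet? pieceTbl i).getD []
      P.foldl (fun pts ligne => ligne.foldl (fun p colonne => p - colonne) pts) points) acc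
    = acc + calcul_resutat_alt pieces := by
  induction pieces with
  | nil => intro acc; simp [calcul_resutat_alt]
  | cons x xs ih =>
    intro acc
    have hx := h x (by simp)
    simp only [List.foldl]
    rw [step_eq acc x hx.1 hx.2, ih (fun i hi => h i (List.mem_cons_of_mem _ hi))]
    simp [calcul_resutat_alt]; ring

-- ===== VERDICT =====
theorem calcul_resutat_spec : Claim_equal_calcul_resutat := by
  intro pieces _ hpre
  unfold Spec_calcul_resutat calcul_resutat
  rw [fold_eq pieces hpre 0]
  ring
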